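-- pv_equiv track=rewrite | github.com/huxiaoou/husfort | src/husfort/qdataviewer.py | parse_sorts
-- ===== SOURCE A (Python) =====
-- def parse_sorts(sort: str, ascending: str) -> tuple[list[str], list[bool]]:
--     sorts = sort.split(",") if sort else []
--     if ascending:
--         ascendings = [z.upper() in ["T", "TRUE"] for z in ascending.split(",")]
--     else:
--         ascendings = [True] * len(sorts)
--     if len(ascendings) >= len(sorts):
--         return sorts, ascendings[0:len(sorts)]
--     else:  # len(ascendings) < len(sorts)
--         if ascendings:
--             return sorts, ascendings + [ascendings[-1]] * (len(sorts) - len(ascendings))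
--         else:
--             return sorts, [True] * len(sorts)
-- ===== SOURCE B (Python) =====
-- def parse_sorts(sort: str, ascending: str) -> tuple[list[str], list[bool]]:
--     sorts = sort.split(",") if sort else []
--     tokens = ascending.split(",") if ascending else []
--     flags = []
--     last = True
--     for i in range(len(sorts)):
--         if i < len(tokens):
--             last = tokens[i].upper() in ("T", "TRUE")
--         flags.append(last)
--     return sorts, flags
-- ===== Notes on version B (the rewrite author's own statement) =====
-- stated objective: alternative
-- what changed: A materializes the full ascending-flag list and then branches three ways on its length (truncate by slice / pad with the last flag / all-True); B never builds that list: it walks the sort columns once with a carried 'last' state, parsing each ascending token lazily only while one exists and otherwise repeating the carried flag.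
import Mathlib
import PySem

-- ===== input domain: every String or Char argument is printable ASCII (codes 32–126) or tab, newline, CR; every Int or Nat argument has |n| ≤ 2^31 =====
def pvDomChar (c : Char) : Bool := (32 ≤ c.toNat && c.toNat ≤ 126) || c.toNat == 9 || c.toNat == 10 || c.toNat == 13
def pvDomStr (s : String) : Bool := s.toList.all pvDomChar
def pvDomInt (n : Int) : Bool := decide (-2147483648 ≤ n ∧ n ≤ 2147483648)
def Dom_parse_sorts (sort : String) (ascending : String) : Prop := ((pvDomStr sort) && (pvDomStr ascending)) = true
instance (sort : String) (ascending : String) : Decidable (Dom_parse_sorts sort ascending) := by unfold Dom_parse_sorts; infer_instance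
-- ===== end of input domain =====

-- B replaces A's materialize-then-truncate/pad/all-True branching by one stateful pass over the
-- sort columns with a carried last flag, parsing ascending tokens lazily (objective: alternative).

-- ===== PORT A =====
def parse_sorts (sort : String) (ascending : String) : List String × List Bool :=
  let sorts := if sort ≠ "" then (PySem.Str.split? sort ",").getD [] else []
  let ascendings :=
    if ascending ≠ "" then
      ((PySem.Str.split? ascending ",").getD []).map (fun z => ["T", "TRUE"].contains (PySem.Str.upper z))
    else List.replicate sorts.length true
  if ascendings.length ≥ sorts.length then
    (sorts, PySem.List.slice ascendings (some 0) (some (sorts.length : Int)))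
  else if ascendings ≠ [] then
    -- ascendings[-1]: the branch guarantees ascendings ≠ [], so the default is unreachable
    (sorts, ascendings ++ List.replicate (sorts.length - ascendings.length) (PySem.List.pyGetD ascendings (-1) true))
  else
    (sorts, List.replicate sorts.length true)

-- ===== PORT B =====
def parse_sorts_alt (sort : String) (ascending : String) : List String × List Bool :=
  let sorts := if sort ≠ "" then (PySem.Str.split? sort ",").getD [] else []
  let tokens := if ascending ≠ "" then (PySem.Str.split? ascending ",").getD [] else []
  -- the loop: state is (flags accumulated so far, carried last flag); tokens[i] only read in range
  let st := (PySem.List.pyRange 0 (sorts.length : Int) 1).foldl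
    (fun (st : List Bool × Bool) i =>
      let last := if i < (tokens.length : Int) then
          ["T", "TRUE"].contains (PySem.Str.upper (PySem.List.pyGetD tokens i ""))
        else st.2
      (st.1 ++ [last], last))
    ([], true)
  (sorts, st.1)

-- ===== PRECONDITION & SPEC =====
def Spec_parse_sorts (sort : String) (ascending : String) (out : List String × List Bool) : Prop := out = parse_sorts_alt sort ascending
instance (sort : String) (ascending : String) (out : List String × List Bool) : Decidable (Spec_parse_sorts sort ascending out) := by unfold Spec_parse_sorts; infer_instance

-- ===== CLAIM (what is proved, stated in full; the proofs are below) =====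
def Claim_equal_parse_sorts : Prop := ∀ (sort : String) (ascending : String), Dom_parse_sorts sort ascending → Spec_parse_sorts sort ascending (parse_sorts sort ascending)

-- ===== LEMMAS AND PROOFS =====

-- the per-index value both sides agree on: flags[i] while in range, else flags[-1] (true if empty)
def pvG (flags : List Bool) (i : Nat) : Bool :=
  if (i : Int) < (flags.length : Int) then PySem.List.pyGetD flags (i : Int) true
  else PySem.List.pyGetD flags (-1) true

-- last element of the first n per-index values, once n has reached the end of flags
theorem pv_lastM (flags : List Bool) (n : Nat) (h : flags.length ≤ n) :
    ((List.range n).map (pvG flags)).getLastD true = PySem.List.pyGetD flags (-1) true := by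
  cases n with
  | zero =>
    have hf : flags = [] := List.eq_nil_of_length_eq_zero (Nat.le_zero.mp h)
    subst hf; simp [PySem.List.pyGetD, PySem.List.pyGet?]
  | succ m =>
    rw [List.range_succ, List.map_append]
    simp only [List.map_cons, List.map_nil, List.getLastD_concat]
    unfold pvG
    split_ifs with hm
    · -- m < flags.length ≤ m+1, so flags.length = m+1 and flags[m] is its last element
      have hlen : flags.length = m + 1 := by exact_mod_cast by omega
      have hne : flags ≠ [] := by intro hf; simp [hf] at hlen
      rw [PySem.List.pyGetD_neg_one flags true hne, PySem.List.pyGetD_natCast,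
        List.getD_eq_getElem?_getD, List.getElem?_eq_getElem (by omega),
        List.getLast_eq_getElem]
      simp [hlen]
    · rfl

-- B's fold computes the first n per-index values together with the carried last flag
theorem pv_fold (tokens : List String) (n : Nat) :
    (PySem.List.pyRange 0 (n : Int) 1).foldl
      (fun (st : List Bool × Bool) i =>
        let last := if i < (tokens.length : Int) then
            ["T", "TRUE"].contains (PySem.Str.upper (PySem.List.pyGetD tokens i ""))
          else st.2
        (st.1 ++ [last], last))
      ([], true)
    = ((List.range n).map (pvG (tokens.map (fun z => ["T", "TRUE"].contains (PySem.Str.upper z)))),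
       ((List.range n).map (pvG (tokens.map (fun z => ["T", "TRUE"].contains (PySem.Str.upper z))))).getLastD true) := by
  induction n with
  | zero => simp [PySem.List.pyRange]
  | succ m ih =>
    have hcast : ((m + 1 : Nat) : Int) = (m : Int) + 1 := by push_cast; ring
    rw [hcast, PySem.List.pyRange_one_succ_right (by positivity), List.foldl_append, ih]
    set flags := tokens.map (fun z => ["T", "TRUE"].contains (PySem.Str.upper z)) with hflags
    simp only [List.foldl_cons, List.foldl_nil]
    have hstep : (if (m : Int) < (tokens.length : Int) then
          ["T", "TRUE"].contains (PySem.Str.upper (PySem.List.pyGetD tokens (m : Int) ""))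
        else ((List.range m).map (pvG flags)).getLastD true) = pvG flags m := by
      have hlen : flags.length = tokens.length := by simp [hflags]
      by_cases hm : (m : Int) < (tokens.length : Int)
      · have hmn : m < tokens.length := by exact_mod_cast hm
        rw [if_pos hm]
        unfold pvG
        rw [if_pos (by rw [hlen]; exact_mod_cast hm)]
        rw [PySem.List.pyGetD_natCast, PySem.List.pyGetD_natCast,
          List.getD_eq_getElem?_getD, List.getD_eq_getElem?_getD,
          List.getElem?_eq_getElem hmn, List.getElem?_eq_getElem (by rw [hlen]; exact hmn)]
        simp [hflags]
      · rw [if_neg hm, pv_lastM flags m (by rw [hlen]; exact_mod_cast Int.not_lt.mp hm)]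
        unfold pvG
        rw [if_neg (by rw [hlen]; exact hm)]
    rw [hstep, List.range_succ, List.map_append]
    simp
-- A's branch-and-slice/pad result equals the first-n per-index values, for every flags and n
theorem pv_branch_eq (flags : List Bool) (n : Nat) :
    (if flags.length ≥ n then PySem.List.slice flags (some 0) (some (n : Int))
     else if flags ≠ [] then
       flags ++ List.replicate (n - flags.length) (PySem.List.pyGetD flags (-1) true)
     else List.replicate n true)
    = (List.range n).map (pvG flags) := by
  split_ifs with h1 h2
  · rw [PySem.List.slice_zero_start, PySem.List.slice_to_natCast]
    apply List.ext_getElem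
    · simp [Nat.min_eq_left h1]
    · intro i hi1 hi2
      have hlt : i < flags.length := by simp at hi1; omega
      simp [pvG, hlt, List.getD_eq_getElem?_getD]
  · apply List.ext_getElem
    · simp; omega
    · intro i hi1 hi2
      simp only [List.getElem_map, List.getElem_range]
      by_cases hlt : i < flags.length
      · rw [List.getElem_append_left hlt]
        unfold pvG
        rw [if_pos (by exact_mod_cast hlt), PySem.List.pyGetD_natCast]
        simp [List.getD_eq_getElem?_getD, List.getElem?_eq_getElem hlt]
      · rw [List.getElem_append_right (by omega), List.getElem_replicate]
        unfold pvG
        rw [if_neg (by simp; exact_mod_cast Nat.le_of_not_lt hlt)]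
  · have hf : flags = [] := by simpa using h2
    subst hf
    apply List.ext_getElem
    · simp
    · intro i hi1 hi2
      simp [pvG, PySem.List.pyGetD, PySem.List.pyGet?]

theorem parse_sorts_spec : Claim_equal_parse_sorts := by
  intro sort ascending _
  unfold Spec_parse_sorts parse_sorts parse_sorts_alt
  dsimp only
  generalize (if sort ≠ "" then (PySem.Str.split? sort ",").getD [] else []) = sorts
  by_cases ha : ascending ≠ ""
  · simp only [if_pos ha]
    rw [pv_fold]
    dsimp only
    have h := pv_branch_eq (((PySem.Str.split? ascending ",").getD []).map
      (fun z => ["T", "TRUE"].contains (PySem.Str.upper z))) sorts.length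
    split_ifs at h ⊢ <;> rw [h]
  · simp only [if_neg ha]
    rw [pv_fold]
    dsimp only
    rw [if_pos (by simp), PySem.List.slice_zero_start, PySem.List.slice_to_natCast,
      List.take_replicate, Nat.min_self]
    simp only [List.map_nil]
    refine congrArg _ ?_
    apply List.ext_getElem
    · simp
    · intro i hi1 hi2
      simp [pvG, PySem.List.pyGetD, PySem.List.pyGet?]
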